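-- pv_equiv track=rewrite | github.com/evanhenri/Crypto-Balances | cryptobalances.py | same_char_str
-- ===== SOURCE A (Python) =====
-- def same_char_str(str_obj, char_obj=None, exclusion_lst=[]):
--     """
--     Returns true if str_obj is comprised of the same character, ignoring characters in exclusions
--     If optional char_obj is specified, it is used for comparison rather than the default, first character in str_obj
--     """
--     str_obj = str(str_obj)
--     if char_obj:
--         char_obj = str(char_obj)
--     else:
--         char_obj = str_obj[0]
--     for c in str_obj:
--         if c != char_obj and c not in exclusion_lst:
--             return False
--     return True
-- ===== SOURCE B (Python) =====
-- def same_char_str(str_obj, char_obj=None, exclusion_lst=[]):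
--     """
--     Returns true if str_obj is comprised of the same character, ignoring characters in exclusions
--     If optional char_obj is specified, it is used for comparison rather than the default, first character in str_obj
--     """
--     str_obj = str(str_obj)
--     char_obj = str(char_obj) if char_obj else str_obj[0]
--     return set(str_obj) - set(exclusion_lst) <= {char_obj}
-- ===== Notes on version B (the rewrite author's own statement) =====
-- stated objective: faster
-- what changed: Replaces the early-exit per-character scanning loop (with a linear 'c not in exclusion_lst' list scan per character) by a single set expression: set(str_obj) - set(exclusion_lst) <= {char_obj}.
import Mathlib
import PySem

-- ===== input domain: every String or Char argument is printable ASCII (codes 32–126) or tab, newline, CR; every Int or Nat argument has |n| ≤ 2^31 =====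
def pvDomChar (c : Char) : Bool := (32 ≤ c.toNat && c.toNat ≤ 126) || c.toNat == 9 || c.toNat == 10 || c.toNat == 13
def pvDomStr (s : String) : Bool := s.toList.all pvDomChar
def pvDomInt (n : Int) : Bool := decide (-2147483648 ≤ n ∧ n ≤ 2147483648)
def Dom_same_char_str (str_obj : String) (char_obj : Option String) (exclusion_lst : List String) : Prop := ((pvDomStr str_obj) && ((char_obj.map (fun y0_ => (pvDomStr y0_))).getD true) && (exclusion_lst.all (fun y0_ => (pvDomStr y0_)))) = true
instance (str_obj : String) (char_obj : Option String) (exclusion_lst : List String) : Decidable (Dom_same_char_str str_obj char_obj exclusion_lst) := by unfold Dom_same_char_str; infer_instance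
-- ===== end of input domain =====

-- B replaces A's early-exit scanning loop by a set expression (set(str_obj) - set(exclusion_lst) <= {char_obj}); objective: simpler.

-- ===== PORT A =====
-- the Python preamble shared by both versions: char_obj if truthy, else str_obj[0] (none = IndexError)
def pvCmpChar (str_obj : String) (char_obj : Option String) : Option String :=
  match char_obj with
  | some c => if c = "" then (PySem.Str.pyGet? str_obj 0).map (fun ch => ch.toString) else some c
  | none => (PySem.Str.pyGet? str_obj 0).map (fun ch => ch.toString)

-- the for-loop of A with its early return False
def pvLoopA (ch : String) (ex : List String) : List Char → Bool
  | [] => true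
  | c :: rest => if c.toString ≠ ch ∧ c.toString ∉ ex then false else pvLoopA ch ex rest

def same_char_str (str_obj : String) (char_obj : Option String) (exclusion_lst : List String) : Bool :=
  match pvCmpChar str_obj char_obj with
  | none => false   -- Python raises IndexError here; excluded by Pre_
  | some ch => pvLoopA ch exclusion_lst str_obj.toList

-- ===== PORT B =====
def same_char_str_alt (str_obj : String) (char_obj : Option String) (exclusion_lst : List String) : Bool :=
  match pvCmpChar str_obj char_obj with
  | none => false   -- Python raises IndexError here; excluded by Pre_
  | some ch =>
      PySem.Set.issubset
        (PySem.Set.diff (PySem.Set.ofList (str_obj.toList.map (fun c => c.toString)))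
                        (PySem.Set.ofList exclusion_lst))
        (PySem.Set.ofList [ch])

-- ===== PRECONDITION & SPEC =====
-- Pre_ excludes exactly the inputs where Python raises IndexError: empty str_obj with a falsy char_obj (None or "")
def Pre_same_char_str (str_obj : String) (char_obj : Option String) (exclusion_lst : List String) : Prop :=
  ¬ (str_obj = "" ∧ (char_obj = none ∨ char_obj = some ""))
instance (str_obj : String) (char_obj : Option String) (exclusion_lst : List String) : Decidable (Pre_same_char_str str_obj char_obj exclusion_lst) := by unfold Pre_same_char_str; infer_instance

def pvWitness_same_char_str : String × Option String × List String := ("aaa-a", none, ["-"])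

def Spec_same_char_str (str_obj : String) (char_obj : Option String) (exclusion_lst : List String) (out : Bool) : Prop := out = same_char_str_alt str_obj char_obj exclusion_lst
instance (str_obj : String) (char_obj : Option String) (exclusion_lst : List String) (out : Bool) : Decidable (Spec_same_char_str str_obj char_obj exclusion_lst out) := by unfold Spec_same_char_str; infer_instance

-- ===== CLAIM (what is proved, stated in full; the proofs are below) =====
def Claim_equal_same_char_str : Prop := ∀ (str_obj : String) (char_obj : Option String) (exclusion_lst : List String), Dom_same_char_str str_obj char_obj exclusion_lst → Pre_same_char_str str_obj char_obj exclusion_lst → Spec_same_char_str str_obj char_obj exclusion_lst (same_char_str str_obj char_obj exclusion_lst)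

-- ===== LEMMAS AND PROOFS =====

-- A's loop checks that every character is ch or excluded
theorem pvLoopA_eq_all (ch : String) (ex : List String) (l : List Char) :
    pvLoopA ch ex l = l.all (fun c => decide (c.toString = ch) || decide (c.toString ∈ ex)) := by
  induction l with
  | nil => rfl
  | cons c rest ih =>
      by_cases h1 : c.toString = ch <;> by_cases h2 : c.toString ∈ ex <;>
        simp [pvLoopA, h1, h2, ih] <;> rfl

-- B's set expression checks the same condition
theorem pvSet_eq_all (ch : String) (ex : List String) (l : List Char) :
    PySem.Set.issubset
        (PySem.Set.diff (PySem.Set.ofList (l.map (fun c => c.toString)))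
                        (PySem.Set.ofList ex))
        (PySem.Set.ofList [ch])
      = l.all (fun c => decide (c.toString = ch) || decide (c.toString ∈ ex)) := by
  rw [Bool.eq_iff_iff]
  rw [PySem.Set.issubset_iff]
  simp only [List.all_eq_true, Bool.or_eq_true, decide_eq_true_eq]
  constructor
  · intro h c hc
    by_cases hm : c.toString ∈ ex
    · exact Or.inr hm
    · have : c.toString ∈ PySem.Set.diff (PySem.Set.ofList (l.map (fun c => c.toString))) (PySem.Set.ofList ex) := by
        rw [PySem.Set.mem_diff, PySem.Set.mem_ofList, PySem.Set.mem_ofList]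
        exact ⟨List.mem_map_of_mem hc, hm⟩
      have := h _ this
      rw [PySem.Set.mem_ofList] at this
      simp only [List.mem_singleton] at this
      exact Or.inl this
  · intro h x hx
    rw [PySem.Set.mem_diff, PySem.Set.mem_ofList, PySem.Set.mem_ofList] at hx
    obtain ⟨hx1, hx2⟩ := hx
    obtain ⟨c, hc, rfl⟩ := List.mem_map.mp hx1
    rw [PySem.Set.mem_ofList]
    rcases h c hc with h' | h'
    · exact List.mem_singleton.mpr h'
    · exact absurd h' hx2

-- ===== VERDICT (by name: the statement is the Claim_ definition above) =====
theorem same_char_str_spec : Claim_equal_same_char_str := by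
  intro str_obj char_obj exclusion_lst _ _
  unfold Spec_same_char_str same_char_str same_char_str_alt
  cases pvCmpChar str_obj char_obj with
  | none => rfl
  | some ch =>
      show pvLoopA ch exclusion_lst str_obj.toList = _
      rw [pvLoopA_eq_all]
      exact (pvSet_eq_all ch exclusion_lst str_obj.toList).symm
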